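-- pv_equiv track=rewrite | github.com/tyouritsugun/curated-heuristic-loop | src/api/services/gpu_installer.py | parse_gpu_priority
-- ===== SOURCE A (Python) =====
-- from typing import Any, Dict, List, Optional, Tuple
--
-- SUPPORTED_GPU_BACKENDS = ("metal", "cuda", "rocm", "cpu")
--
-- DEFAULT_GPU_PRIORITY = ("metal", "cuda", "rocm", "cpu")
--
-- def parse_gpu_priority(value: Optional[str]) -> List[str]:
--     if not value:
--         ordered = list(DEFAULT_GPU_PRIORITY)
--     else:
--         tokens = [token.strip().lower() for token in value.split(",") if token.strip()]
--         ordered = []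
--         for token in tokens:
--             if token in SUPPORTED_GPU_BACKENDS and token not in ordered:
--                 ordered.append(token)
--         for backend in DEFAULT_GPU_PRIORITY:
--             if backend not in ordered:
--                 ordered.append(backend)
--     return ordered
-- ===== SOURCE B (Python) =====
-- from typing import List, Optional
--
-- SUPPORTED_GPU_BACKENDS = ("metal", "cuda", "rocm", "cpu")
--
-- DEFAULT_GPU_PRIORITY = ("metal", "cuda", "rocm", "cpu")
--
-- def parse_gpu_priority(value: Optional[str]) -> List[str]:
--     if not value:
--         return list(DEFAULT_GPU_PRIORITY)
--     tokens = [token.strip().lower() for token in value.split(",") if token.strip()]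
--     # rank: supported backend -> index of its FIRST appearance among the tokens
--     rank = {}
--     for i, token in enumerate(tokens):
--         if token in SUPPORTED_GPU_BACKENDS and token not in rank:
--             rank[token] = i
--     n = len(tokens)
--     w = len(DEFAULT_GPU_PRIORITY)
--     # appearing backends in first-appearance order, then the rest in default order
--     return sorted(DEFAULT_GPU_PRIORITY,
--                   key=lambda b: rank.get(b, n) * w + DEFAULT_GPU_PRIORITY.index(b))
-- ===== Notes on version B (the rewrite author's own statement) =====
-- stated objective: alternative
-- what changed: Replaces A's two accumulate-with-membership-scan loops by a single first-appearance rank pass over the tokens followed by one stable sort of the fixed default tuple under the combined key rank*len(DEFAULT)+default_index.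
import Mathlib
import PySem

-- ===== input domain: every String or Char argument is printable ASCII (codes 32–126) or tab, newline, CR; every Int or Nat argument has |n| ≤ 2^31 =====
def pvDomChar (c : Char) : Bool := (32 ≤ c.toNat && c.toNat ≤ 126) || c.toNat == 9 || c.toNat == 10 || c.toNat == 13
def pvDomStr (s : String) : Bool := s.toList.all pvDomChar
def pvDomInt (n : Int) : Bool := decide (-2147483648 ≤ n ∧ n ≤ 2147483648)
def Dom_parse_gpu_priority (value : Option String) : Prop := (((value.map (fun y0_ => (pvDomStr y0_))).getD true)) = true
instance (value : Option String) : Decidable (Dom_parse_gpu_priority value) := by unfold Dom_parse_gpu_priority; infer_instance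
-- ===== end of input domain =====

-- B replaces A's two accumulate-with-membership-scan loops by a single first-appearance
-- rank pass over the tokens plus one sort of the fixed default list under a combined key
-- (alternative decomposition, same cost).

-- SUPPORTED_GPU_BACKENDS / DEFAULT_GPU_PRIORITY (module constants, both the same 4-tuple)
def pvSUP : List String := ["metal", "cuda", "rocm", "cpu"]
def pvDEF : List String := ["metal", "cuda", "rocm", "cpu"]

-- shared comprehension: [token.strip().lower() for token in value.split(",") if token.strip()]
-- (split? is some because the separator "," is nonempty)
def pvTokens (s : String) : List String :=
  (((PySem.Str.split? s ",").getD []).filter (fun t => PySem.Str.strip t != "")).map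
    (fun t => PySem.Str.lower (PySem.Str.strip t))

-- ===== PORT A =====
def parse_gpu_priority (value : Option String) : List String :=
  match value with
  | none => pvDEF
  | some s =>
    if s = "" then pvDEF          -- `not value` is also true for the empty string
    else
      let tokens := pvTokens s
      let ordered := tokens.foldl
        (fun acc t => if pvSUP.contains t && !(acc.contains t) then acc ++ [t] else acc) []
      pvDEF.foldl (fun acc b => if !(acc.contains b) then acc ++ [b] else acc) ordered

-- ===== PORT B =====
def parse_gpu_priority_alt (value : Option String) : List String :=
  match value with
  | none => pvDEF
  | some s =>
    if s = "" then pvDEF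
    else
      let tokens := pvTokens s
      let rank := (PySem.List.enumerate tokens).foldl
        (fun d p => if pvSUP.contains p.2 && !(d.contains p.2) then d.insert p.2 p.1 else d)
        (PySem.Dict.empty : PySem.Dict String Int)
      let n : Int := tokens.length
      let w : Int := pvDEF.length
      -- DEFAULT_GPU_PRIORITY.index(b): b is always a member of pvDEF here, so index? is some
      PySem.List.sorted pvDEF
        (fun b => rank.getD b n * w + (((PySem.List.index? pvDEF b).getD 0 : Nat) : Int)) false

-- ===== PRECONDITION & SPEC =====
def Spec_parse_gpu_priority (value : Option String) (out : List String) : Prop := out = parse_gpu_priority_alt value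
instance (value : Option String) (out : List String) : Decidable (Spec_parse_gpu_priority value out) := by unfold Spec_parse_gpu_priority; infer_instance

-- ===== CLAIM (what is proved, stated in full; the proofs are below) =====
def Claim_equal_parse_gpu_priority : Prop := ∀ (value : Option String), Dom_parse_gpu_priority value → Spec_parse_gpu_priority value (parse_gpu_priority value)

-- ===== LEMMAS AND PROOFS =====

-- A's second loop appends the defaults missing from acc, in default order.
theorem appendMissing_eq (dl : List String) (hnd : dl.Nodup) :
    ∀ (acc : List String),
      dl.foldl (fun acc b => if !(acc.contains b) then acc ++ [b] else acc) acc
        = acc ++ dl.filter (fun b => !(acc.contains b)) := by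
  induction dl with
  | nil => intro acc; simp
  | cons b rest ih =>
    obtain ⟨hb, hrest⟩ := List.nodup_cons.mp hnd
    intro acc
    simp only [List.foldl_cons, List.filter_cons]
    by_cases hc : acc.contains b
    · simp only [hc, Bool.not_true, Bool.false_eq_true, if_false]
      exact ih hrest acc
    · have hcb : acc.contains b = false := by simpa using hc
      simp only [hcb, Bool.not_false, if_true]
      rw [ih hrest (acc ++ [b])]
      have : rest.filter (fun x => !((acc ++ [b]).contains x))
           = rest.filter (fun x => !(acc.contains x)) := by
        apply List.filter_congr
        intro x hx
        have hxb : x ≠ b := fun h => hb (h ▸ hx)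
        simp [hxb]
      rw [this]
      simp

-- joint invariant of A's dedup loop and B's rank loop: the dict's keys in insertion order
-- ARE A's dedup list, and its values are strictly increasing first-appearance indices < i.
theorem loop_inv (ts : List String) :
    ∀ (i : Int) (d : PySem.Dict String Int) (acc : List String),
      d.keys = acc → acc.Nodup →
      ((d.items.map (·.2)).Pairwise (· < ·)) →
      (∀ v ∈ d.items.map (·.2), v < i) →
      (∀ b ∈ acc, b ∈ pvSUP) →
      (let d' := (PySem.List.enumerate ts i).foldl
          (fun d p => if pvSUP.contains p.2 && !(d.contains p.2) then d.insert p.2 p.1 else d) d;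
       let acc' := ts.foldl
          (fun acc t => if pvSUP.contains t && !(acc.contains t) then acc ++ [t] else acc) acc;
       d'.keys = acc' ∧ acc'.Nodup ∧ ((d'.items.map (·.2)).Pairwise (· < ·)) ∧
       (∀ v ∈ d'.items.map (·.2), v < i + ts.length) ∧ (∀ b ∈ acc', b ∈ pvSUP)) := by
  induction ts with
  | nil =>
    intro i d acc h1 h2 h3 h4 h5
    simp only [PySem.List.enumerate_nil, List.foldl_nil, List.length_nil]
    exact ⟨h1, h2, h3, by simpa using h4, h5⟩
  | cons t rest ih =>
    intro i d acc h1 h2 h3 h4 h5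
    rw [PySem.List.enumerate_cons]
    simp only [List.foldl_cons]
    have hct : d.contains t = acc.contains t := by
      rw [PySem.Dict.contains_eq_decide_mem_keys, h1]; simp
    by_cases hc : (pvSUP.contains t && !(acc.contains t)) = true
    · have hacc : acc.contains t = false := by
        rcases Bool.and_eq_true_iff.mp hc with ⟨_, hn⟩; simpa using hn
      have hdc : d.contains t = false := hct.trans hacc
      have htacc : t ∉ acc := by simpa using hacc
      rw [if_pos (by rw [hct]; exact hc), if_pos hc]
      have hitems := PySem.Dict.items_insert_of_not_contains d i hdc
      have hkeys := PySem.Dict.keys_insert_of_not_contains d i hdc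
      have res := ih (i + 1) (d.insert t i) (acc ++ [t])
        (by rw [hkeys, h1])
        (by simp only [List.nodup_append, List.nodup_singleton, h2, true_and]
            intro a ha b hb
            simp only [List.mem_singleton] at hb
            subst hb
            exact fun h => htacc (h ▸ ha))
        (by rw [hitems]; simp only [List.map_append]
            rw [List.pairwise_append]
            exact ⟨h3, by simp, by intro a ha b hb; simp at hb; subst hb; exact h4 a ha⟩)
        (by rw [hitems]; simp only [List.map_append]
            intro v hv; rcases List.mem_append.mp hv with h | h
            · exact lt_trans (h4 v h) (by omega)
            · simp at h; omega)
        (by intro b hb; rcases List.mem_append.mp hb with h | h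
            · exact h5 b h
            · simp at h; subst h
              have := (Bool.and_eq_true_iff.mp hc).1; simpa using this)
      have harith : i + 1 + ((rest.length : Nat) : Int) = i + (((t :: rest).length : Nat) : Int) := by
        simp [List.length_cons]; ring
      rw [harith] at res
      exact res
    · have hcb : (pvSUP.contains t && !(acc.contains t)) = false := by simpa using hc
      have hc' : ¬ (pvSUP.contains t && !(d.contains t)) = true := by rw [hct]; exact hc
      rw [if_neg hc', if_neg hc]
      have res := ih (i + 1) d acc h1 h2 h3
        (fun v hv => lt_trans (h4 v hv) (by omega)) h5
      have harith : i + 1 + ((rest.length : Nat) : Int) = i + (((t :: rest).length : Nat) : Int) := by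
        simp [List.length_cons]; ring
      rw [harith] at res
      exact res

theorem pvIdx_bounds : ∀ b ∈ pvDEF,
    (0 : Int) ≤ (((PySem.List.index? pvDEF b).getD 0 : Nat) : Int) ∧
    (((PySem.List.index? pvDEF b).getD 0 : Nat) : Int) ≤ 3 := by decide

theorem pvIdx_mono : pvDEF.Pairwise (fun a b =>
    (((PySem.List.index? pvDEF a).getD 0 : Nat) : Int) <
    (((PySem.List.index? pvDEF b).getD 0 : Nat) : Int)) := by decide

theorem pvLen : ((pvDEF.length : Nat) : Int) = 4 := by decide

-- the sort under the combined key yields L ++ (defaults missing from L)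
theorem sorted_char (L : List String) (n : Int) (f : String → Int)
    (hsub : ∀ b ∈ L, b ∈ pvDEF) (hnd : L.Nodup)
    (hmono : L.Pairwise (fun a b => f a < f b)) (hlt : ∀ b ∈ L, f b < n)
    (habs : ∀ b, b ∉ L → f b = n) :
    PySem.List.sorted pvDEF
        (fun b => f b * (pvDEF.length : Int) + (((PySem.List.index? pvDEF b).getD 0 : Nat) : Int)) false
      = L ++ pvDEF.filter (fun b => !(L.contains b)) := by
  apply PySem.List.sorted_eq_of_perm_of_pairwise_lt
  · -- permutation
    have h1 : (pvDEF.filter (fun b => L.contains b) ++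
        pvDEF.filter (fun b => !(L.contains b))).Perm pvDEF :=
      List.filter_append_perm _ _
    have h2 : L.Perm (pvDEF.filter (fun b => L.contains b)) := by
      rw [List.perm_ext_iff_of_nodup hnd (List.Nodup.filter _ (by decide))]
      intro a
      simp only [List.mem_filter, List.contains_iff_mem]
      constructor
      · intro ha; exact ⟨hsub a ha, by simpa using ha⟩
      · intro ⟨_, ha⟩; simpa using ha
    exact (h2.append_right _).trans h1
  · -- strictly increasing combined keys along L ++ missing defaults
    rw [List.pairwise_append]
    refine ⟨?_, ?_, ?_⟩
    · refine hmono.imp_of_mem ?_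
      intro a b ha hb hab
      have hia := pvIdx_bounds a (hsub a ha)
      have hib := pvIdx_bounds b (hsub b hb)
      rw [pvLen]
      omega
    · have := (pvIdx_mono.filter (fun b => !(L.contains b)))
      refine this.imp_of_mem ?_
      intro a b ha hb hab
      have hna : a ∉ L := by
        have := (List.mem_filter.mp ha).2; simpa using this
      have hnb : b ∉ L := by
        have := (List.mem_filter.mp hb).2; simpa using this
      rw [habs a hna, habs b hnb]
      omega
    · intro a ha b hb
      have hfa := hlt a ha
      have hia := pvIdx_bounds a (hsub a ha)
      have hib := pvIdx_bounds b (List.mem_of_mem_filter hb)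
      have hnb : b ∉ L := by
        have := (List.mem_filter.mp hb).2; simpa using this
      rw [habs b hnb, pvLen]
      omega

-- the two ports agree on any token list
theorem core_eq (ts : List String) :
    pvDEF.foldl (fun acc b => if !(acc.contains b) then acc ++ [b] else acc)
      (ts.foldl (fun acc t => if pvSUP.contains t && !(acc.contains t) then acc ++ [t] else acc) [])
    = PySem.List.sorted pvDEF
        (fun b => ((PySem.List.enumerate ts).foldl
            (fun d p => if pvSUP.contains p.2 && !(d.contains p.2) then d.insert p.2 p.1 else d)
            (PySem.Dict.empty : PySem.Dict String Int)).getD b ts.length * (pvDEF.length : Int)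
          + (((PySem.List.index? pvDEF b).getD 0 : Nat) : Int)) false := by
  have res := loop_inv ts 0 PySem.Dict.empty []
    (by rfl) (by simp) (by simp [PySem.Dict.empty]) (by simp [PySem.Dict.empty]) (by simp)
  set d' := (PySem.List.enumerate ts 0).foldl
      (fun d p => if pvSUP.contains p.2 && !(d.contains p.2) then d.insert p.2 p.1 else d)
      (PySem.Dict.empty : PySem.Dict String Int) with hd'
  set L := ts.foldl
      (fun acc t => if pvSUP.contains t && !(acc.contains t) then acc ++ [t] else acc) [] with hL
  obtain ⟨hkeys, hnd, hpw, hbnd, hsup⟩ := res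
  have hknd : d'.keys.Nodup := hkeys ▸ hnd
  set n : Int := (ts.length : Int) with hn
  have hitems := PySem.Dict.items_eq_map_keys d' hknd n
  have hmapsnd : d'.items.map (·.2) = L.map (fun b => d'.getD b n) := by
    rw [hitems, hkeys, List.map_map]; rfl
  have hmono : L.Pairwise (fun a b => d'.getD a n < d'.getD b n) := by
    have := hpw; rw [hmapsnd] at this
    exact (List.pairwise_map).mp this
  have hlt : ∀ b ∈ L, d'.getD b n < n := by
    intro b hb
    have : d'.getD b n ∈ d'.items.map (·.2) := by
      rw [hmapsnd]; exact List.mem_map_of_mem hb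
    have := hbnd _ this
    omega
  have habs : ∀ b, b ∉ L → d'.getD b n = n := by
    intro b hb
    apply PySem.Dict.getD_of_not_contains
    rw [PySem.Dict.contains_eq_decide_mem_keys, hkeys]
    simpa using hb
  have hsub : ∀ b ∈ L, b ∈ pvDEF := fun b hb => hsup b hb
  rw [appendMissing_eq pvDEF (by decide) L]
  exact (sorted_char L n (fun b => d'.getD b n) hsub hnd hmono hlt habs).symm

-- ===== VERDICT (by name: the statement is the Claim_ definition above) =====
theorem parse_gpu_priority_spec : Claim_equal_parse_gpu_priority := by
  intro value _
  unfold Spec_parse_gpu_priority parse_gpu_priority parse_gpu_priority_alt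
  cases value with
  | none => rfl
  | some s =>
    by_cases hs : s = ""
    · simp [hs]
    · simp only [if_neg hs]
      exact core_eq (pvTokens s)
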